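-- pv_equiv track=rewrite | github.com/BrastoRR/bh67 | 6.7.py | sum_of_neighbours
-- ===== SOURCE A (Python) =====
-- def sum_of_neighbours(numbers):
--     result = []
--     for i in range(len(numbers)):
--         if i < len(numbers) - 1:
--             result.append(numbers[i - 1] + numbers[i + 1])
--         else:
--             result.append(numbers[i - 1] + numbers[0])
--     return result
-- ===== SOURCE B (Python) =====
-- def sum_of_neighbours(numbers):
--     prev = numbers[-1:] + numbers[:-1]
--     nxt = numbers[1:] + numbers[:1]
--     return [p + q for p, q in zip(prev, nxt)]
-- ===== Notes on version B (the rewrite author's own statement) =====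
-- stated objective: idiomatic
-- what changed: Replaces the index loop with its wrap-around branch by two rotated copies of the list (left and right cyclic neighbours) zipped with addition, no index arithmetic or branching.
import Mathlib
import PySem

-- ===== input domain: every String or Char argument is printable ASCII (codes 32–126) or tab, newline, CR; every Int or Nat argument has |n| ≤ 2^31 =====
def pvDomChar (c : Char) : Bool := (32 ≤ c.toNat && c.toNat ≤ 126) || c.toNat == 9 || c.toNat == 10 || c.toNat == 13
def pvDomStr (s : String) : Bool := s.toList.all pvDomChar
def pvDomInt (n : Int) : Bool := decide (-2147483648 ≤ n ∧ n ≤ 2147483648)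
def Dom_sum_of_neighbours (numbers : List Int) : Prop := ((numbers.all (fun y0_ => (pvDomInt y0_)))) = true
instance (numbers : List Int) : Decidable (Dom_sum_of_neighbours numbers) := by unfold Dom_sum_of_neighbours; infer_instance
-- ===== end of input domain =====

-- B replaces A's index loop with its wrap-around branch by two rotated copies of the list (left and right cyclic neighbours) zipped with addition; same cost, no index arithmetic.

-- ===== PORT A =====
-- the indices i-1, i+1 and 0 are always in range inside the loop (i-1 = -1 wraps to the last element), so pyGetD with a dummy default is exact
def sum_of_neighbours (numbers : List Int) : List Int :=
  (PySem.List.pyRange 0 (numbers.length : Int) 1).foldl (fun result i =>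
    if i < (numbers.length : Int) - 1 then
      result ++ [PySem.List.pyGetD numbers (i - 1) 0 + PySem.List.pyGetD numbers (i + 1) 0]
    else
      result ++ [PySem.List.pyGetD numbers (i - 1) 0 + PySem.List.pyGetD numbers 0 0]) []

-- ===== PORT B =====
def sum_of_neighbours_alt (numbers : List Int) : List Int :=
  let prev := PySem.List.slice numbers (some (-1)) none ++ PySem.List.slice numbers none (some (-1))
  let nxt := PySem.List.slice numbers (some 1) none ++ PySem.List.slice numbers none (some 1)
  List.zipWith (· + ·) prev nxt


-- ===== PRECONDITION & SPEC =====
def Spec_sum_of_neighbours (numbers : List Int) (out : List Int) : Prop := out = sum_of_neighbours_alt numbers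
instance (numbers : List Int) (out : List Int) : Decidable (Spec_sum_of_neighbours numbers out) := by unfold Spec_sum_of_neighbours; infer_instance

-- ===== CLAIM (what is proved, stated in full; the proofs are below) =====
def Claim_equal_sum_of_neighbours : Prop := ∀ (numbers : List Int), Dom_sum_of_neighbours numbers → Spec_sum_of_neighbours numbers (sum_of_neighbours numbers)

-- ===== LEMMAS AND PROOFS =====

theorem sum_of_neighbours_eq_map (numbers : List Int) :
    sum_of_neighbours numbers =
      (List.range numbers.length).map (fun (k : Nat) =>
        if (k : Int) < (numbers.length : Int) - 1 then
          PySem.List.pyGetD numbers ((k : Int) - 1) 0 + PySem.List.pyGetD numbers ((k : Int) + 1) 0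
        else
          PySem.List.pyGetD numbers ((k : Int) - 1) 0 + PySem.List.pyGetD numbers 0 0) := by
  unfold sum_of_neighbours
  have hbody : (fun (result : List Int) (i : Int) =>
      if i < (numbers.length : Int) - 1 then
        result ++ [PySem.List.pyGetD numbers (i - 1) 0 + PySem.List.pyGetD numbers (i + 1) 0]
      else
        result ++ [PySem.List.pyGetD numbers (i - 1) 0 + PySem.List.pyGetD numbers 0 0])
      = fun result i => result ++ [if i < (numbers.length : Int) - 1 then
          PySem.List.pyGetD numbers (i - 1) 0 + PySem.List.pyGetD numbers (i + 1) 0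
        else
          PySem.List.pyGetD numbers (i - 1) 0 + PySem.List.pyGetD numbers 0 0] := by
    funext r i; split <;> rfl
  rw [hbody, PySem.List.foldl_append_singleton_eq_map, PySem.List.pyRange_one]
  simp [List.map_map, Function.comp_def]

theorem alt_eq (numbers : List Int) :
    sum_of_neighbours_alt numbers = List.zipWith (· + ·)
      (numbers.drop (numbers.length - 1) ++ numbers.dropLast)
      (numbers.tail ++ numbers.take 1) := by
  unfold sum_of_neighbours_alt
  rw [PySem.List.slice_from_neg_one, PySem.List.slice_to_neg_one,
      PySem.List.slice_from_one, show (1 : Int) = ((1 : Nat) : Int) from rfl,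
      PySem.List.slice_to_natCast]

theorem sum_of_neighbours_eq_alt (numbers : List Int) : sum_of_neighbours numbers = sum_of_neighbours_alt numbers := by
  rw [sum_of_neighbours_eq_map, alt_eq]
  rcases Nat.eq_zero_or_pos numbers.length with h0 | hnpos
  · simp [List.eq_nil_of_length_eq_zero h0]
  have hne : numbers ≠ [] := by intro h; simp [h] at hnpos
  apply List.ext_getElem
  · simp only [List.length_map, List.length_range, List.length_zipWith,
      List.length_append, List.length_drop, List.length_dropLast, List.length_tail,
      List.length_take]
    omega
  · intro j hj1 hj2
    simp only [List.length_map, List.length_range] at hj1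
    rw [List.getElem_map, List.getElem_range, List.getElem_zipWith]
    have hlenL : (numbers.drop (numbers.length - 1) ++ numbers.dropLast).length = numbers.length := by
      simp; try omega
    have hlenR : (numbers.tail ++ numbers.take 1).length = numbers.length := by
      simp; try omega
    by_cases hj0 : j = 0
    · subst hj0
      have hfirst : PySem.List.pyGetD numbers ((0 : Nat) - 1) 0 = numbers.getLast hne := by
        simpa using PySem.List.pyGetD_neg_one (xs := numbers) (d := 0) hne
      have hL : (numbers.drop (numbers.length - 1) ++ numbers.dropLast)[0]'(by omega) =
          numbers.getLast hne := by
        rw [List.getElem_append_left (by simp; try omega)]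
        rw [List.getElem_drop, List.getLast_eq_getElem]
        congr 1 <;> omega
      rw [hfirst, hL]
      by_cases h1 : numbers.length = 1
      · have h2 : ¬ ((0:Nat):Int) < (numbers.length:Int) - 1 := by push_cast; omega
        rw [if_neg h2]
        have hR : (numbers.tail ++ numbers.take 1)[0]'(by omega) = numbers[0]'(by omega) := by
          rw [List.getElem_append_right (by simp; try omega)]
          simp
        rw [hR]
        congr 1
        rw [PySem.List.pyGetD_zero]
        exact List.getD_eq_getElem _ _ (by omega)
      · have h2 : ((0:Nat):Int) < (numbers.length:Int) - 1 := by push_cast; omega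
        rw [if_pos h2]
        have hA2 : PySem.List.pyGetD numbers ((0:Nat) + 1) 0 = numbers[1]'(by omega) := by
          rw [PySem.List.pyGetD_eq_getElem _ _ (by push_cast; try omega)
            (by push_cast; try omega)]
          congr 1 <;> omega
        have hR : (numbers.tail ++ numbers.take 1)[0]'(by omega) = numbers[1]'(by omega) := by
          rw [List.getElem_append_left (by simp; try omega)]
          rw [List.getElem_tail]
        rw [hA2, hR]
    · have hj1' : 1 ≤ j := Nat.one_le_iff_ne_zero.mpr hj0
      have hA1 : PySem.List.pyGetD numbers ((j:Nat) - 1 : Int) 0 = numbers[j-1]'(by omega) := by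
        rw [PySem.List.pyGetD_eq_getElem _ _ (by push_cast; try omega)
          (by push_cast; try omega)]
        congr 1 <;> omega
      have hL : (numbers.drop (numbers.length - 1) ++ numbers.dropLast)[j]'(by omega) =
          numbers[j-1]'(by omega) := by
        rw [List.getElem_append_right (by simp; try omega)]
        rw [List.getElem_dropLast]
        congr 1 <;> simp <;> omega
      rw [hA1, hL]
      by_cases hlast : j = numbers.length - 1
      · have h2 : ¬ ((j:Nat):Int) < (numbers.length:Int) - 1 := by push_cast; omega
        rw [if_neg h2]
        have hR : (numbers.tail ++ numbers.take 1)[j]'(by omega) = numbers[0]'(by omega) := by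
          rw [List.getElem_append_right (by simp; try omega)]
          rw [List.getElem_take]
          congr 1 <;> simp <;> omega
        rw [hR]
        congr 1
        rw [PySem.List.pyGetD_zero]
        exact List.getD_eq_getElem _ _ (by omega)
      · have h2 : ((j:Nat):Int) < (numbers.length:Int) - 1 := by push_cast; omega
        rw [if_pos h2]
        have hA2 : PySem.List.pyGetD numbers ((j:Nat) + 1 : Int) 0 = numbers[j+1]'(by omega) := by
          rw [PySem.List.pyGetD_eq_getElem _ _ (by push_cast; try omega)
            (by push_cast; try omega)]
          congr 1 <;> omega
        have hR : (numbers.tail ++ numbers.take 1)[j]'(by omega) = numbers[j+1]'(by omega) := by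
          rw [List.getElem_append_left (by simp; try omega)]
          rw [List.getElem_tail]
        rw [hA2, hR]

-- ===== VERDICT (by name: the statement is the Claim_ definition above) =====
theorem sum_of_neighbours_spec : Claim_equal_sum_of_neighbours := by
  intro numbers _
  exact sum_of_neighbours_eq_alt numbers
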